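-- pv_equiv track=rewrite | github.com/socalledtheraven/Skyblock-Tools | main.py | remove_formatting
-- ===== SOURCE A (Python) =====
-- def remove_formatting(string):
--     formatting_codes = [
--         "4", "c", "6", "e", "2", "a", "b", "3", "1", "9", "d", "5",
--         "f", "7", "8", "0", "k", "l", "m", "n", "o", "r"
--     ]  # sets up formatting codes so I can ignore them
--
--     for code in formatting_codes:
--         string = string.replace(code, "")  # as above
--
--     string = "".join(c for c in string if ord(c) < 128)
--     return string.encode("ascii", "ignore").decode()
-- ===== SOURCE B (Python) =====
-- def remove_formatting(string):
--     codes = frozenset("4c6e2ab319d5f780klmnor")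
--     return "".join(c for c in string if c not in codes and ord(c) < 128)
-- ===== Notes on version B (the rewrite author's own statement) =====
-- stated objective: simpler
-- what changed: Replaces A's 22 sequential full-string str.replace passes plus a separate ASCII filter plus an encode/decode round-trip with a single one-pass comprehension that drops a character if it is in a precomputed set of the 22 code characters or is non-ASCII.
import Mathlib
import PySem

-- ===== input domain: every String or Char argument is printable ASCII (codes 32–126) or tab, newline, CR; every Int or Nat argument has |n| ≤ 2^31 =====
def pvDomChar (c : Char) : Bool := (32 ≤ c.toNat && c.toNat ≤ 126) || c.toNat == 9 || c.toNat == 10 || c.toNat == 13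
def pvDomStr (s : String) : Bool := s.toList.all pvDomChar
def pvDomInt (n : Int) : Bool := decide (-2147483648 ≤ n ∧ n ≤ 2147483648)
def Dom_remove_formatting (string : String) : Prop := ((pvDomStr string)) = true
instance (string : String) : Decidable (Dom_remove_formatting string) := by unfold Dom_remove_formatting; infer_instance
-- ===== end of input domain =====

-- B replaces A's 22 sequential str.replace passes + ASCII filter + encode/decode round-trip
-- with one single-pass filter against a precomputed set of code characters (objective: simpler).


-- ===== PORT A =====
def pvFormattingCodes : List String :=
  ["4", "c", "6", "e", "2", "a", "b", "3", "1", "9", "d", "5",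
   "f", "7", "8", "0", "k", "l", "m", "n", "o", "r"]

def remove_formatting (string : String) : String :=
  let s1 := pvFormattingCodes.foldl (fun s code => PySem.Str.replace s code "") string
  -- "".join(c for c in string if ord(c) < 128)
  let s2 := String.ofList (s1.toList.filter (fun c => decide (c.toNat < 128)))
  -- encode("ascii","ignore").decode() drops the non-ASCII code points; exact here
  String.ofList (s2.toList.filter (fun c => decide (c.toNat < 128)))

-- ===== PORT B =====
def pvCodes : PySem.Set Char :=
  PySem.Set.ofList ['4','c','6','e','2','a','b','3','1','9','d','5','f','7','8','0','k','l','m','n','o','r']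

def remove_formatting_alt (string : String) : String :=
  String.ofList (string.toList.filter (fun c => !pvCodes.contains c && decide (c.toNat < 128)))

-- ===== PRECONDITION & SPEC =====
def Spec_remove_formatting (string : String) (out : String) : Prop := out = remove_formatting_alt string
instance (string : String) (out : String) : Decidable (Spec_remove_formatting string out) := by unfold Spec_remove_formatting; infer_instance

-- ===== CLAIM (what is proved, stated in full; the proofs are below) =====
def Claim_equal_remove_formatting : Prop := ∀ (string : String), Dom_remove_formatting string → Spec_remove_formatting string (remove_formatting string)

-- ===== LEMMAS AND PROOFS =====

-- replace.go with a single-char pattern and empty replacement is a filter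
theorem pv_go_single (c : Char) : ∀ (l : List Char) (fuel : Nat) (acc : List Char),
    l.length ≤ fuel →
    PySem.Chars.replace.go [c] [] fuel l acc = acc.reverse ++ l.filter (fun x => x != c) := by
  intro l
  induction l with
  | nil => intro fuel acc _; cases fuel <;> simp [PySem.Chars.replace.go]
  | cons c' t ih =>
      intro fuel acc h
      cases fuel with
      | zero => simp at h
      | succ f =>
          simp only [PySem.Chars.replace.go]
          by_cases hc : c = c'
          · subst hc
            simp only [List.isPrefixOf, BEq.rfl, Bool.and_self, if_true, List.length_cons,
              List.length_nil, Nat.zero_add, List.drop_succ_cons, List.drop_zero, List.reverse_nil,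
              List.nil_append]
            rw [ih _ _ (Nat.le_of_succ_le_succ h)]
            simp
          · have : ([c].isPrefixOf (c' :: t)) = false := by
              simp [List.isPrefixOf, hc]
            rw [this]
            simp only [Bool.false_eq_true, if_false]
            rw [ih _ _ (Nat.le_of_succ_le_succ h)]
            simp [Ne.symm hc]

theorem pv_replace_single (s : List Char) (c : Char) :
    PySem.Chars.replace s [c] [] = s.filter (fun x => x != c) := by
  rw [PySem.Chars.replace]
  simp [pv_go_single c s s.length []]

-- string-level: replacing a single-char code by "" filters that char out
theorem pv_str_replace_char (s code : String) (c : Char) (h : code.toList = [c]) :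
    (PySem.Str.replace s code "").toList = s.toList.filter (fun x => x != c) := by
  rw [PySem.Str.toList_replace, h]
  simpa using pv_replace_single s.toList c

-- the fold of single-char removals over a char list is one filter
theorem pv_foldl_filter (cs : List Char) : ∀ (l : List Char),
    cs.foldl (fun s c => s.filter (fun x => x != c)) l
      = l.filter (fun x => !cs.contains x) := by
  induction cs with
  | nil => intro l; simp
  | cons c cs' ih =>
      intro l
      simp only [List.foldl_cons]
      rw [ih, List.filter_filter]
      apply List.filter_congr
      intro x _
      by_cases hx : x = c <;> simp [hx]

theorem remove_formatting_spec : Claim_equal_remove_formatting := by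
  intro string _
  unfold Spec_remove_formatting remove_formatting remove_formatting_alt pvFormattingCodes
  simp only [List.foldl_cons, List.foldl_nil]
  apply congrArg String.ofList
  -- collapse the 22 replace passes into one filter chain on the char list
  have hrep : ∀ (s : String) (code : String) (c : Char), code.toList = [c] →
      (PySem.Str.replace s code "").toList = s.toList.filter (fun x => x != c) :=
    fun s code c h => pv_str_replace_char s code c h
  rw [hrep _ "r" 'r' rfl, hrep _ "o" 'o' rfl, hrep _ "n" 'n' rfl, hrep _ "m" 'm' rfl,
      hrep _ "l" 'l' rfl, hrep _ "k" 'k' rfl, hrep _ "0" '0' rfl, hrep _ "8" '8' rfl,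
      hrep _ "7" '7' rfl, hrep _ "f" 'f' rfl, hrep _ "5" '5' rfl, hrep _ "d" 'd' rfl,
      hrep _ "9" '9' rfl, hrep _ "1" '1' rfl, hrep _ "3" '3' rfl, hrep _ "b" 'b' rfl,
      hrep _ "a" 'a' rfl, hrep _ "2" '2' rfl, hrep _ "e" 'e' rfl, hrep _ "6" '6' rfl,
      hrep _ "c" 'c' rfl, hrep _ "4" '4' rfl]
  have h22 := pv_foldl_filter
      ['4','c','6','e','2','a','b','3','1','9','d','5','f','7','8','0','k','l','m','n','o','r']
      string.toList
  simp only [List.foldl_cons, List.foldl_nil] at h22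
  rw [h22]
  simp only [String.toList_ofList, List.filter_filter]
  apply List.filter_congr
  intro c _
  have hset : pvCodes
      = ['4','c','6','e','2','a','b','3','1','9','d','5','f','7','8','0','k','l','m','n','o','r'] := by
    decide
  rw [hset]
  cases hm : List.contains ['4','c','6','e','2','a','b','3','1','9','d','5','f','7','8','0','k','l','m','n','o','r'] c <;>
    cases ha : decide (c.toNat < 128) <;> simp [hm, ha] <;> simp_all <;> tauto
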